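-- pv_equiv track=rewrite | github.com/Ahairyoldserver/Messages | resource_bundle_validation.py | _get_placeholders
-- ===== SOURCE A (Python) =====
-- def _get_placeholders(value: str) -> list[str]:
--     placeholders: list[str] = []
--     current_placeholder: str = ''
--
--     for c in value:
--         if c == '$' and len(current_placeholder) == 0:
--             current_placeholder += c
--         elif c == '{' and len(current_placeholder) == 1 and current_placeholder[0] == '$':
--             current_placeholder += c
--         elif c == '}' and len(current_placeholder) > 2:
--             current_placeholder += c
--             placeholders.append(current_placeholder)
--             current_placeholder = ''
--         elif len(current_placeholder) > 1 and current_placeholder[0] == '$' and current_placeholder[1] == '{':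
--             current_placeholder += c
--     return placeholders
-- ===== SOURCE B (Python) =====
-- def _get_placeholders(value: str) -> list[str]:
--     out: list[str] = []
--     rest = value
--     while True:
--         _, sep, rest = rest.partition('$')
--         if not sep:
--             return out
--         _, sep, rest = rest.partition('{')
--         if not sep:
--             return out
--         if not rest:
--             return out
--         c0, rest = rest[0], rest[1:]
--         body, sep, rest = rest.partition('}')
--         if not sep:
--             return out
--         out.append('${' + c0 + body + '}')
-- ===== Notes on version B (the rewrite author's own statement) =====
-- stated objective: faster
-- what changed: Replaced A's per-character state machine (growing a current_placeholder string through four guarded branches) by a partition-and-jump scan that repeatedly splits the remaining string at the next dollar sign, the next opening brace, one unconditional content character, and the next closing brace, emitting each placeholder directly.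
import Mathlib
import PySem

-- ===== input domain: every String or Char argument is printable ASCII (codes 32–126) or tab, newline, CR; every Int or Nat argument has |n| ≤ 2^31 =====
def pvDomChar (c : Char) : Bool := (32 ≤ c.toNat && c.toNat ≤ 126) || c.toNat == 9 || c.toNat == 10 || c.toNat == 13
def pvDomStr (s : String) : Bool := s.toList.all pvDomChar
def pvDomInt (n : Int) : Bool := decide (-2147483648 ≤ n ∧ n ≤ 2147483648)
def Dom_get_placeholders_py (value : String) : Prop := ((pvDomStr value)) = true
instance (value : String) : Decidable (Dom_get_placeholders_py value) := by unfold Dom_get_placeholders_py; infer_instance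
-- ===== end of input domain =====

-- B replaces A's per-character state machine by a partition-and-jump scan
-- ('$', then '{', then one unconditional content char, then up to the first '}'); same return value.

-- ===== PORT A =====
-- one step of A's for-loop; state = (placeholders, current_placeholder as a char list)
def aStep (st : List String × List Char) (c : Char) : List String × List Char :=
  let ps := st.1
  let cp := st.2
  if c = '$' ∧ cp.length = 0 then (ps, cp ++ [c])
  else if c = '{' ∧ cp.length = 1 ∧ cp.head? = some '$' then (ps, cp ++ [c])
  else if c = '}' ∧ cp.length > 2 then (ps ++ [String.ofList (cp ++ [c])], [])
  else if cp.length > 1 ∧ cp.head? = some '$' ∧ cp[1]? = some '{' then (ps, cp ++ [c])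
  else (ps, cp)

def get_placeholders_py (value : String) : List String :=
  (value.toList.foldl aStep ([], [])).1

-- ===== PORT B =====
-- Source B's while-loop: each `rest.partition(x)` step is dropWhile/takeWhile on the char list,
-- `rest[0], rest[1:]` is head/tail; the accumulated output is threaded through the recursion.
def altGo (cs : List Char) (acc : List String) : List String :=
  let q := cs.dropWhile (· ≠ '$')
  if hq : q = [] then acc else
  let r := q.tail
  let q1 := r.dropWhile (· ≠ '{')
  if hq1 : q1 = [] then acc else
  let r1 := q1.tail
  if hr1 : r1 = [] then acc else
  let c0 := r1.head hr1
  let r2 := r1.tail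
  let q2 := r2.dropWhile (· ≠ '}')
  if hq2 : q2 = [] then acc else
  altGo q2.tail (acc ++ [String.ofList ('$' :: '{' :: c0 :: r2.takeWhile (· ≠ '}') ++ ['}'])])
termination_by cs.length
decreasing_by
  have e1 := List.length_dropWhile_le (p := (· ≠ '$')) (l := cs)
  have e2 := List.length_dropWhile_le (p := (· ≠ '{')) (l := (cs.dropWhile (· ≠ '$')).tail)
  have e3 := List.length_dropWhile_le (p := (· ≠ '}'))
    (l := ((cs.dropWhile (· ≠ '$')).tail.dropWhile (· ≠ '{')).tail.tail)
  have l1 : (cs.dropWhile (· ≠ '$')).length ≥ 1 := List.length_pos_of_ne_nil hq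
  have l2 : ((cs.dropWhile (· ≠ '$')).tail.dropWhile (· ≠ '{')).length ≥ 1 :=
    List.length_pos_of_ne_nil hq1
  have l3 : ((cs.dropWhile (· ≠ '$')).tail.dropWhile (· ≠ '{')).tail.length ≥ 1 :=
    List.length_pos_of_ne_nil hr1
  have l4 : (((cs.dropWhile (· ≠ '$')).tail.dropWhile (· ≠ '{')).tail.tail.dropWhile (· ≠ '}')).length ≥ 1 :=
    List.length_pos_of_ne_nil hq2
  simp [List.length_tail] at *
  omega

def get_placeholders_py_alt (value : String) : List String :=
  altGo value.toList []

-- ===== PRECONDITION & SPEC =====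
def Spec_get_placeholders_py (value : String) (out : List String) : Prop := out = get_placeholders_py_alt value
instance (value : String) (out : List String) : Decidable (Spec_get_placeholders_py value out) := by unfold Spec_get_placeholders_py; infer_instance

-- ===== CLAIM (what is proved, stated in full; the proofs are below) =====
def Claim_equal_get_placeholders_py : Prop := ∀ (value : String), Dom_get_placeholders_py value → Spec_get_placeholders_py value (get_placeholders_py value)

-- ===== LEMMAS AND PROOFS =====

-- the head of a non-empty dropWhile result falsifies the predicate
lemma dropWhile_head_false {p : Char → Bool} {l t : List Char} {d : Char}
    (h : l.dropWhile p = d :: t) : p d = false := by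
  induction l with
  | nil => simp at h
  | cons a l ih =>
    rw [List.dropWhile_cons] at h
    by_cases hp : p a
    · exact ih (by simpa [hp] using h)
    · simp [hp] at h
      rw [← h.1]; simpa using hp

-- evaluation lemmas for altGo, one per exit point
lemma altA {cs : List Char} {acc : List String} (h1 : cs.dropWhile (· ≠ '$') = []) :
    altGo cs acc = acc := by
  simp only [ne_eq, decide_not] at h1
  rw [altGo]; simp [h1]

lemma altB {cs r : List Char} {d : Char} {acc : List String}
    (h1 : cs.dropWhile (· ≠ '$') = d :: r) (h2 : r.dropWhile (· ≠ '{') = []) :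
    altGo cs acc = acc := by
  simp only [ne_eq, decide_not] at h1 h2
  rw [altGo]; simp [h1, h2]

lemma altC {cs r : List Char} {d e : Char} {acc : List String}
    (h1 : cs.dropWhile (· ≠ '$') = d :: r) (h2 : r.dropWhile (· ≠ '{') = [e]) :
    altGo cs acc = acc := by
  simp only [ne_eq, decide_not] at h1 h2
  rw [altGo]; simp [h1, h2]

lemma altD {cs r r2 : List Char} {d e c0 : Char} {acc : List String}
    (h1 : cs.dropWhile (· ≠ '$') = d :: r) (h2 : r.dropWhile (· ≠ '{') = e :: c0 :: r2)
    (h3 : r2.dropWhile (· ≠ '}') = []) :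
    altGo cs acc = acc := by
  simp only [ne_eq, decide_not] at h1 h2 h3
  rw [altGo]; simp [h1, h2, h3]

lemma altE {cs r r2 r3 : List Char} {d e c0 f : Char} {acc : List String}
    (h1 : cs.dropWhile (· ≠ '$') = d :: r) (h2 : r.dropWhile (· ≠ '{') = e :: c0 :: r2)
    (h3 : r2.dropWhile (· ≠ '}') = f :: r3) :
    altGo cs acc = altGo r3 (acc ++ [String.ofList ('$' :: '{' :: c0 :: r2.takeWhile (· ≠ '}') ++ ['}'])]) := by
  simp only [ne_eq, decide_not] at h1 h2 h3
  conv_lhs => rw [altGo]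
  simp [h1, h2, h3]

-- in state cp = [], characters other than '$' are ignored by A's loop
lemma skip0 (p : List Char) (acc : List String) (hp : ∀ c ∈ p, ¬ c = '$') :
    p.foldl aStep (acc, []) = (acc, []) := by
  induction p with
  | nil => rfl
  | cons c t ih =>
    have hc : ¬ c = '$' := hp c (by simp)
    have : aStep (acc, []) c = (acc, []) := by simp [aStep, hc]
    rw [List.foldl_cons, this]
    exact ih (fun c hc => hp c (by simp [hc]))

-- in state cp = ['$'], characters other than '{' are ignored
lemma skip1 (p : List Char) (acc : List String) (hp : ∀ c ∈ p, ¬ c = '{') :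
    p.foldl aStep (acc, ['$']) = (acc, ['$']) := by
  induction p with
  | nil => rfl
  | cons c t ih =>
    have hc : ¬ c = '{' := hp c (by simp)
    have : aStep (acc, ['$']) c = (acc, ['$']) := by simp [aStep, hc]
    rw [List.foldl_cons, this]
    exact ih (fun c hc => hp c (by simp [hc]))

-- in an open placeholder of length ≥ 3, every non-'}' character is appended
lemma skip3 (p : List Char) (acc : List String) (c0 : Char) (u : List Char)
    (hp : ∀ c ∈ p, ¬ c = '}') :
    p.foldl aStep (acc, '$' :: '{' :: c0 :: u) = (acc, '$' :: '{' :: c0 :: (u ++ p)) := by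
  induction p generalizing u with
  | nil => simp
  | cons c t ih =>
    have hc : ¬ c = '}' := hp c (by simp)
    have : aStep (acc, '$' :: '{' :: c0 :: u) c = (acc, '$' :: '{' :: c0 :: (u ++ [c])) := by
      simp [aStep, hc]
    rw [List.foldl_cons, this, ih (u ++ [c]) (fun c hc => hp c (by simp [hc]))]
    simp

lemma main_loop (n : ℕ) : ∀ (cs : List Char), cs.length ≤ n → ∀ (acc : List String),
    (cs.foldl aStep (acc, [])).1 = altGo cs acc := by
  induction n with
  | zero =>
    intro cs hcs acc
    have hnil : cs = [] := List.eq_nil_of_length_eq_zero (by omega)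
    subst hnil
    rw [altA (by simp)]
    rfl
  | succ n ih =>
    intro cs hcs acc
    have hsplit := List.takeWhile_append_dropWhile (p := (· ≠ '$')) (l := cs)
    cases h1 : cs.dropWhile (· ≠ '$') with
    | nil =>
      rw [h1] at hsplit
      conv_lhs => rw [← hsplit]
      simp only [List.append_nil]
      rw [skip0 _ _ (fun c hc => by simpa using List.mem_takeWhile_imp hc)]
      rw [altA h1]
    | cons d r =>
      have hd : d = '$' := by
        have := dropWhile_head_false h1
        simpa using this
      subst hd
      rw [h1] at hsplit
      conv_lhs => rw [← hsplit]
      rw [List.foldl_append, skip0 _ _ (fun c hc => by simpa using List.mem_takeWhile_imp hc),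
        List.foldl_cons]
      have st1 : aStep (acc, []) '$' = (acc, ['$']) := by simp [aStep]
      rw [st1]
      have hsplit2 := List.takeWhile_append_dropWhile (p := (· ≠ '{')) (l := r)
      cases h2 : r.dropWhile (· ≠ '{') with
      | nil =>
        rw [h2] at hsplit2
        conv_lhs => rw [← hsplit2]
        simp only [List.append_nil]
        rw [skip1 _ _ (fun c hc => by simpa using List.mem_takeWhile_imp hc)]
        rw [altB h1 h2]
      | cons e r1 =>
        have he : e = '{' := by
          have := dropWhile_head_false h2
          simpa using this
        subst he
        rw [h2] at hsplit2
        conv_lhs => rw [← hsplit2]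
        rw [List.foldl_append, skip1 _ _ (fun c hc => by simpa using List.mem_takeWhile_imp hc),
          List.foldl_cons]
        have st2 : aStep (acc, ['$']) '{' = (acc, ['$', '{']) := by simp [aStep]
        rw [st2]
        cases r1 with
        | nil =>
          rw [altC h1 h2]
          rfl
        | cons c0 r2 =>
          rw [List.foldl_cons]
          have st3 : aStep (acc, ['$', '{']) c0 = (acc, ['$', '{', c0]) := by
            simp [aStep]
          rw [st3]
          have hsplit3 := List.takeWhile_append_dropWhile (p := (· ≠ '}')) (l := r2)
          cases h3 : r2.dropWhile (· ≠ '}') with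
          | nil =>
            rw [h3] at hsplit3
            conv_lhs => rw [← hsplit3]
            simp only [List.append_nil]
            rw [show ('$' :: '{' :: [c0] : List Char) = '$' :: '{' :: c0 :: ([] : List Char) from rfl]
            rw [skip3 _ _ _ _ (fun c hc => by simpa using List.mem_takeWhile_imp hc)]
            rw [altD h1 h2 h3]
          | cons f r3 =>
            have hf : f = '}' := by
              have := dropWhile_head_false h3
              simpa using this
            subst hf
            rw [h3] at hsplit3
            conv_lhs => rw [← hsplit3]
            rw [show ('$' :: '{' :: [c0] : List Char) = '$' :: '{' :: c0 :: ([] : List Char) from rfl]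
            rw [List.foldl_append,
              skip3 _ _ _ _ (fun c hc => by simpa using List.mem_takeWhile_imp hc),
              List.foldl_cons]
            have st4 : aStep (acc, '$' :: '{' :: c0 :: ([] ++ r2.takeWhile (· ≠ '}'))) '}'
                = (acc ++ [String.ofList ('$' :: '{' :: c0 :: r2.takeWhile (· ≠ '}') ++ ['}'])], []) := by
              simp [aStep]
            rw [st4]
            have hr3 : r3.length ≤ n := by
              have hl1 : cs.length = (cs.takeWhile (· ≠ '$')).length + (r.length + 1) := by
                conv_lhs => rw [← hsplit]
                simp
              have hl2 : r.length = (r.takeWhile (· ≠ '{')).length + (r2.length + 2) := by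
                conv_lhs => rw [← hsplit2]
                simp
              have hl3 : r2.length = (r2.takeWhile (· ≠ '}')).length + (r3.length + 1) := by
                conv_lhs => rw [← hsplit3]
                simp
              omega
            rw [ih r3 hr3]
            rw [altE h1 h2 h3]

-- ===== VERDICT (by name: the statement is the Claim_ definition above) =====
theorem get_placeholders_py_spec : Claim_equal_get_placeholders_py := by
  intro value _
  unfold Spec_get_placeholders_py get_placeholders_py get_placeholders_py_alt
  exact main_loop value.toList.length value.toList le_rfl []
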